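-- pv_equiv track=rewrite | github.com/gli81/HuaweiTest | 045/PrettyName.py | prettyName
-- ===== SOURCE A (Python) =====
-- def prettyName(name: 'str') -> 'int':
--     table = {}
--     for char in name:
--         if char.lower() not in table:
--             table[char.lower()] = 1
--         else:
--             table[char.lower()] += 1
--     sorted_appearance = sorted(table.values(), reverse=True)
--     ans = 0
--     for i in range(len(sorted_appearance)):
--         ans += (26 - i) * sorted_appearance[i]
--     return ans
-- ===== SOURCE B (Python) =====
-- def prettyName(name: 'str') -> 'int':
--     ks = sorted(c.lower() for c in name)
--     freqs = []
--     i = 0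
--     while i < len(ks):
--         j = i + 1
--         while j < len(ks) and ks[j] == ks[i]:
--             j += 1
--         freqs.append(j - i)
--         i = j
--     freqs.sort(reverse=True)
--     ans = 0
--     for rank, f in enumerate(freqs):
--         ans += (26 - rank) * f
--     return ans
-- ===== Notes on version B (the rewrite author's own statement) =====
-- stated objective: alternative
-- what changed: Replaces A's dict-increment counting with sort-then-group: B sorts the lowercased characters once, reads each run length off the sorted list as a frequency, sorts the frequencies descending and takes the weighted sum via enumerate.
import Mathlib
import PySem

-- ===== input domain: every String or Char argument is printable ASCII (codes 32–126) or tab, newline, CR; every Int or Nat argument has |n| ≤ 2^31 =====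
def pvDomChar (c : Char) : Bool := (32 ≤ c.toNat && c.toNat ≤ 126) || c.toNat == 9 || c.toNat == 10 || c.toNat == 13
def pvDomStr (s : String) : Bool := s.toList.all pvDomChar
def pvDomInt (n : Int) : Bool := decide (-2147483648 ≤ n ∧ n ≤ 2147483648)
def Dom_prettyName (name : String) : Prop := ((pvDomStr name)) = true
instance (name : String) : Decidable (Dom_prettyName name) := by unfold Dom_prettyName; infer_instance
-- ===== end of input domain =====

-- B replaces A's dict-increment counting by sort-then-group (run lengths of the sorted
-- lowercased characters are the frequencies); alternative decomposition, similar cost.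

-- ===== PORT A =====
-- 'char.lower()' on the ASCII domain is the single character PySem.Chars.lowerChar c.
def prettyName (name : String) : Int :=
  let table := name.toList.foldl
    (fun t c =>
      if t.contains (PySem.Chars.lowerChar c) = false
      then t.insert (PySem.Chars.lowerChar c) 1
      else t.insert (PySem.Chars.lowerChar c) (t.getD (PySem.Chars.lowerChar c) 0 + 1))
    PySem.Dict.empty
  let sorted_appearance := PySem.List.sorted table.values (fun x => x) true
  (PySem.List.pyRange 0 (PySem.List.len sorted_appearance) 1).foldl
    (fun ans i => ans + (26 - i) * PySem.List.pyGetD sorted_appearance i 0) 0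

-- ===== PORT B =====
-- The two nested while loops of Source B: each outer step reads one maximal run of equal
-- characters (the inner while = takeWhile) and appends its length j - i.
def pvRuns : List Char → List Int
  | [] => []
  | x :: xs =>
    (((xs.takeWhile (fun y => y == x)).length : Int) + 1)
      :: pvRuns (xs.dropWhile (fun y => y == x))
termination_by l => l.length
decreasing_by
  exact Nat.lt_succ_of_le (List.length_dropWhile_le _ _)

def prettyName_alt (name : String) : Int :=
  let ks := PySem.List.sorted (name.toList.map PySem.Chars.lowerChar) (fun x => x) false
  let freqs := PySem.List.sorted (pvRuns ks) (fun x => x) true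
  (PySem.List.enumerate freqs).foldl (fun ans p => ans + (26 - p.1) * p.2) 0

-- ===== PRECONDITION & SPEC =====
def Spec_prettyName (name : String) (out : Int) : Prop := out = prettyName_alt name
instance (name : String) (out : Int) : Decidable (Spec_prettyName name out) := by unfold Spec_prettyName; infer_instance

-- ===== CLAIM (what is proved, stated in full; the proofs are below) =====
def Claim_equal_prettyName : Prop := ∀ (name : String), Dom_prettyName name → Spec_prettyName name (prettyName name)

-- ===== LEMMAS AND PROOFS =====

-- A's counting loop is collections.Counter of the lowercased character list.
theorem pv_fold_eq_counter (l : List Char) :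
    l.foldl
      (fun t c =>
        if t.contains (PySem.Chars.lowerChar c) = false
        then t.insert (PySem.Chars.lowerChar c) 1
        else t.insert (PySem.Chars.lowerChar c) (t.getD (PySem.Chars.lowerChar c) 0 + 1))
      PySem.Dict.empty
      = PySem.Dict.counter (l.map PySem.Chars.lowerChar) := by
  rw [← PySem.Dict.foldl_insert_getD_add_one_eq_counter, List.foldl_map]
  congr 1
  funext t c
  by_cases h : t.contains (PySem.Chars.lowerChar c) = false
  · simp [h, PySem.Dict.getD_of_not_contains t 0 h]
  · simp [h]

-- all-x prefixes contribute nothing to a set once x is discarded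
theorem pv_ofList_discard (x : Char) (t r : List Char) (ht : ∀ y ∈ t, y = x) :
    (PySem.Set.ofList (t ++ r)).discard x = (PySem.Set.ofList r).discard x := by
  induction t with
  | nil => rfl
  | cons y t' ih =>
    have hy : y = x := ht y (by simp)
    subst hy
    rw [List.cons_append, PySem.Set.ofList_cons]
    have := ih (fun z hz => ht z (by simp [hz]))
    simp only [PySem.Set.discard, List.filter] at this ⊢
    simp [List.filter_filter, this]

-- run lengths of a sorted list = counts of its distinct elements, in first-occurrence order
theorem pv_runs_sorted (ks : List Char) (hs : ks.Pairwise (· ≤ ·)) :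
    pvRuns ks = (PySem.Set.ofList ks).map (fun k => (ks.count k : Int)) := by
  induction ks using pvRuns.induct with
  | case1 => simp [pvRuns]
  | case2 x xs ih =>
    set t := xs.takeWhile (fun y => y == x) with hT
    set r := xs.dropWhile (fun y => y == x) with hR
    have hsplit : xs = t ++ r := (List.takeWhile_append_dropWhile).symm
    have hxs : xs.Pairwise (· ≤ ·) := (List.pairwise_cons.mp hs).2
    have hxle : ∀ y ∈ xs, x ≤ y := (List.pairwise_cons.mp hs).1
    have hr : r.Pairwise (· ≤ ·) := List.Pairwise.sublist (List.dropWhile_sublist _) hxs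
    have ht : ∀ y ∈ t, y = x := by
      intro y hy
      have := List.mem_takeWhile_imp hy
      simpa using this
    -- every element of r differs from x
    have hrx : ∀ k ∈ r, k ≠ x := by
      intro k hk
      cases hcr : r with
      | nil => simp [hcr] at hk
      | cons h tl =>
        have hhead : ¬ ((h == x) = true) := by
          have := List.head_dropWhile_not (fun y => y == x) (l := xs)
          rw [← hR, hcr] at this
          simpa using this (by simp)
        have hhx : h ≠ x := by simpa using hhead
        have hhmem : h ∈ xs := by
          rw [hsplit, hcr]; simp
        have hxh : x < h := lt_of_le_of_ne (hxle h hhmem) (Ne.symm hhx)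
        rw [hcr] at hk
        rcases List.mem_cons.mp hk with rfl | hk'
        · exact hhx
        · have hhk : h ≤ k := by
            rw [hcr] at hr
            exact (List.pairwise_cons.mp hr).1 k hk'
          exact (lt_of_lt_of_le hxh hhk).ne'
    have hxnr : x ∉ r := fun hx => (hrx x hx) rfl
    -- the set of x :: xs is x followed by the set of r
    have hset : PySem.Set.ofList (x :: xs) = x :: PySem.Set.ofList r := by
      rw [PySem.Set.ofList_cons, hsplit, pv_ofList_discard x t r ht]
      congr 1
      simp only [PySem.Set.discard]
      apply List.filter_eq_self.mpr
      intro a ha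
      have : a ∈ r := (PySem.Set.mem_ofList r a).mp ha
      simpa using hrx a this
    rw [show pvRuns (x :: xs) = (((t.length : Int)) + 1) :: pvRuns r by
          rw [pvRuns]]
    rw [hset, List.map_cons]
    have hcount_x : (x :: xs).count x = 1 + t.length := by
      rw [hsplit, ← List.cons_append, List.count_append]
      have h1 : (x :: t).count x = 1 + t.length := by
        rw [List.count_cons_self]
        have : t.count x = t.length := List.count_eq_length.mpr (fun b hb => (ht b hb).symm)
        omega
      have h2 : r.count x = 0 := List.count_eq_zero.mpr hxnr
      omega
    refine List.cons_eq_cons.mpr ⟨?_, ?_⟩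
    · rw [hcount_x]; push_cast; ring
    · rw [ih hr]
      apply List.map_congr_left
      intro k hk
      have hkr : k ∈ r := (PySem.Set.mem_ofList r k).mp hk
      have hkx : k ≠ x := hrx k hkr
      congr 1
      rw [hsplit, ← List.cons_append, List.count_append]
      have h1 : (x :: t).count k = 0 := by
        apply List.count_eq_zero.mpr
        intro hkm
        rcases List.mem_cons.mp hkm with rfl | hkt
        · exact hkx rfl
        · exact hkx (ht k hkt)
      omega


-- ===== VERDICT (by name: the statement is the Claim_ definition above) =====
theorem prettyName_spec : Claim_equal_prettyName := by
  intro name _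
  simp only [Spec_prettyName, prettyName, prettyName_alt]
  set ks0 := name.toList.map PySem.Chars.lowerChar with hks0
  set ks := PySem.List.sorted ks0 (fun x => x) false with hks
  -- A's value list
  have hvals : (name.toList.foldl
      (fun t c =>
        if t.contains (PySem.Chars.lowerChar c) = false
        then t.insert (PySem.Chars.lowerChar c) 1
        else t.insert (PySem.Chars.lowerChar c) (t.getD (PySem.Chars.lowerChar c) 0 + 1))
      PySem.Dict.empty).values
      = (PySem.Set.ofList ks0).map (fun k => (ks0.count k : Int)) := by
    rw [pv_fold_eq_counter, ← hks0]
    show ((PySem.Dict.counter ks0).items).map (·.2) = _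
    rw [PySem.Dict.items_counter, List.map_map]
    rfl
  -- B's frequency list
  have hperm0 : ks.Perm ks0 := PySem.List.sorted_perm ks0 (fun x => x) false
  have hfreqs : pvRuns ks = (PySem.Set.ofList ks).map (fun k => (ks0.count k : Int)) := by
    rw [pv_runs_sorted ks (PySem.List.sorted_pairwise ks0 (fun x => x))]
    apply List.map_congr_left
    intro k _
    rw [hperm0.count_eq]
  -- the two lists are permutations, so their descending sorts agree
  have hpermsets : (PySem.Set.ofList ks).Perm (PySem.Set.ofList ks0) := by
    rw [List.perm_ext_iff_of_nodup (PySem.Set.nodup_ofList ks) (PySem.Set.nodup_ofList ks0)]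
    intro a
    rw [PySem.Set.mem_ofList, PySem.Set.mem_ofList, hperm0.mem_iff]
  have hperm : (pvRuns ks).Perm
      ((PySem.Set.ofList ks0).map (fun k => (ks0.count k : Int))) := by
    rw [hfreqs]; exact hpermsets.map _
  have hsorted_eq :
      PySem.List.sorted (pvRuns ks) (fun x => x) true
        = PySem.List.sorted ((PySem.Set.ofList ks0).map (fun k => (ks0.count k : Int)))
            (fun x => x) true := by
    apply List.Perm.eq_of_pairwise
      (le := fun a b : Int => b ≤ a)
      (fun a b _ _ h1 h2 => le_antisymm h2 h1)
      (PySem.List.sorted_pairwise_rev _ _)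
      (PySem.List.sorted_pairwise_rev _ _)
    exact ((PySem.List.sorted_perm _ _ _).trans hperm).trans
      (PySem.List.sorted_perm _ _ _).symm
  rw [hvals, ← hsorted_eq]
  -- identical sorted lists: A's indexed loop = B's enumerate fold
  set sa := PySem.List.sorted (pvRuns ks) (fun x => x) true
  rw [PySem.List.enumerate_eq_map_pyRange sa 0, List.foldl_map]
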